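-- pv_equiv track=rewrite | github.com/hoonisfree/Algorithm | 프로그래머스/2/84512. 모음 사전/모음 사전.py | solution
-- ===== SOURCE A (Python) =====
-- def solution(word):
--     v = ['A','E','I','O','U']
--     weight = [5**4+5**3+5**2+5**1+5**0,5**3+5**2+5**1+5**0,5**2+5**1+5**0,5**1+5**0,5**0]
--     result = 0
--
--     for i,char in enumerate(word):
--         index = v.index(char)
--         result += index*weight[i] +1
--
--     return result
-- ===== SOURCE B (Python) =====
-- def solution(word):
--     # Build the whole vowel dictionary ("" included) in preorder = dictionary order,
--     # then the answer is simply the position of word in that list.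
--     words = []
--
--     def gen(prefix):
--         words.append(prefix)
--         if len(prefix) < 5:
--             for c in "AEIOU":
--                 gen(prefix + c)
--
--     gen("")
--     return words.index(word)
-- ===== Notes on version B (the rewrite author's own statement) =====
-- stated objective: alternative
-- what changed: A computes the rank by weighted positional arithmetic (index*weight per character); B generates the entire vowel dictionary (empty prefix included) by a preorder DFS, which is exactly dictionary order, and returns the word's position in that list.
import Mathlib
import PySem

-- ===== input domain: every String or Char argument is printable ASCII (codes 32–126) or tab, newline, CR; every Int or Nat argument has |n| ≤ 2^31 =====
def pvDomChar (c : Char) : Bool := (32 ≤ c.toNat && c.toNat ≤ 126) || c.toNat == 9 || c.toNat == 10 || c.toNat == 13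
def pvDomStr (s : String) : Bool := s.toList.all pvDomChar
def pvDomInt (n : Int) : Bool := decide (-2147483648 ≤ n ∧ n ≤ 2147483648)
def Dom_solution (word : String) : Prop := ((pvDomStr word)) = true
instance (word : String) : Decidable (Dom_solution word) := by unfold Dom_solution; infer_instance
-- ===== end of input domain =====

-- B replaces A's weighted positional arithmetic by generating the whole vowel dictionary
-- (empty prefix included) in preorder = dictionary order and returning the word's index
-- in that list (objective: alternative algorithm, not faster).

-- ===== PORT A =====
def pvVowels : List Char := ['A', 'E', 'I', 'O', 'U']

def solution (word : String) : Int :=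
  let weight : List Int :=
    [5^4+5^3+5^2+5^1+5^0, 5^3+5^2+5^1+5^0, 5^2+5^1+5^0, 5^1+5^0, 5^0]
  (PySem.List.enumerate word.toList).foldl
    (fun result p =>
      -- v.index(char): ValueError (none) outside Pre_; weight[i]: IndexError (none) outside Pre_
      let index : Int := ((PySem.List.index? pvVowels p.2).getD 0 : Nat)
      result + index * (PySem.List.pyGet? weight p.1).getD 0 + 1)
    0

-- ===== PORT B =====
-- Source B's recursion 'gen(prefix)' guarded by len(prefix) < 5, transcribed with
-- fuel = 5 - len(prefix): fuel 0 means the guard is false and only the prefix is recorded.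
def pvGen : Nat → String → List String
  | 0, p => [p]
  | n+1, p => p :: ("AEIOU".toList).flatMap (fun c => pvGen n (p.push c))

def solution_alt (word : String) : Int :=
  -- words.index(word): ValueError (none) outside Pre_
  ((PySem.List.index? (pvGen 5 "") word).getD 0 : Nat)

-- ===== PRECONDITION & SPEC =====
-- Exactly the inputs on which A returns: every character a vowel (else v.index raises
-- ValueError) and at most 5 of them (else weight[i] raises IndexError). B raises
-- ValueError (word not in the generated dictionary) on the same excluded inputs.
def Pre_solution (word : String) : Prop :=
  (word.toList.all (fun c => pvVowels.contains c)) = true ∧ word.toList.length ≤ 5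
instance (word : String) : Decidable (Pre_solution word) := by unfold Pre_solution; infer_instance

def pvWitness_solution : String := "EIO"

def Spec_solution (word : String) (out : Int) : Prop := out = solution_alt word
instance (word : String) (out : Int) : Decidable (Spec_solution word out) := by unfold Spec_solution; infer_instance

-- ===== CLAIM (what is proved, stated in full; the proofs are below) =====
def Claim_equal_solution : Prop :=
  ∀ (word : String), Dom_solution word → Pre_solution word → Spec_solution word (solution word)

-- ===== LEMMAS AND PROOFS =====

-- size of the dictionary generated with the given fuel
def pvSizeT : Nat → Nat
  | 0 => 1
  | n+1 => 1 + 5 * pvSizeT n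

-- the rank A computes, written as the structural recursion B's search realises
def pvRank : Nat → List Char → Nat
  | _, [] => 0
  | 0, _ :: _ => 0
  | n+1, c :: cs => 1 + (PySem.List.index? pvVowels c).getD 0 * pvSizeT n + pvRank n cs

theorem pvAEIOU_toList : "AEIOU".toList = ['A', 'E', 'I', 'O', 'U'] := rfl

theorem pvGen_length (n : Nat) : ∀ p : String, (pvGen n p).length = pvSizeT n := by
  induction n with
  | zero => intro p; rfl
  | succ n ih =>
      intro p
      simp [pvGen, pvSizeT, pvAEIOU_toList, ih]
      ring

theorem pv_index?_append_not_mem {α : Type} [BEq α] [LawfulBEq α] (l₁ l₂ : List α) (v : α)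
    (h : v ∉ l₁) :
    PySem.List.index? (l₁ ++ l₂) v = (PySem.List.index? l₂ v).map (· + l₁.length) := by
  induction l₁ with
  | nil => simp
  | cons x t ih =>
      have hx : x ≠ v := fun he => h (he ▸ List.mem_cons_self)
      rw [List.cons_append, PySem.List.index?_cons_of_ne (v := v) (xs := t ++ l₂) hx,
        ih (fun hm => h (List.mem_cons_of_mem _ hm)), Option.map_map]
      simp only [List.length_cons, Function.comp_def]
      cases PySem.List.index? l₂ v
      · simp
      · simp
        omega

theorem pv_mem_pvGen (n : Nat) : ∀ (p : String) (t : String), t ∈ pvGen n p →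
    ∃ u, t = String.ofList (p.toList ++ u) := by
  induction n with
  | zero =>
      intro p t ht
      simp [pvGen] at ht
      exact ⟨[], by simp [ht]⟩
  | succ n ih =>
      intro p t ht
      simp only [pvGen, List.mem_cons, List.mem_flatMap] at ht
      rcases ht with rfl | ⟨c, _, hmem⟩
      · exact ⟨[], by simp⟩
      · rcases ih (p.push c) t hmem with ⟨u, rfl⟩
        exact ⟨c :: u, by simp⟩

theorem pv_not_mem_gen (n : Nat) (p : String) (c c' : Char) (cs : List Char) (hne : c' ≠ c) :
    String.ofList (p.toList ++ c :: cs) ∉ pvGen n (p.push c') := by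
  intro hm
  rcases pv_mem_pvGen n (p.push c') _ hm with ⟨u, hu⟩
  rw [String.ofList_inj] at hu
  simp [List.append_assoc] at hu
  exact hne hu.1.symm

theorem pv_skip_block (n : Nat) (p : String) (c c' : Char) (cs : List Char) (hne : c' ≠ c)
    (rest : List String) :
    PySem.List.index? (pvGen n (p.push c') ++ rest) (String.ofList (p.toList ++ c :: cs))
      = (PySem.List.index? rest (String.ofList (p.toList ++ c :: cs))).map (· + pvSizeT n) := by
  rw [pv_index?_append_not_mem _ _ _ (pv_not_mem_gen n p c c' cs hne), pvGen_length]

theorem pvIndex_gen (n : Nat) : ∀ (p : String) (s : List Char), s.length ≤ n →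
    (∀ c ∈ s, c ∈ pvVowels) →
    PySem.List.index? (pvGen n p) (String.ofList (p.toList ++ s)) = some (pvRank n s) := by
  induction n with
  | zero =>
      intro p s hlen _
      have hs : s = [] := List.eq_nil_of_length_eq_zero (Nat.le_zero.mp hlen)
      subst hs
      have hp : String.ofList (p.toList ++ []) = p := by simp
      rw [hp]
      simp [pvGen, pvRank]
  | succ n ih =>
      intro p s hlen hv
      cases s with
      | nil =>
          have hp : String.ofList (p.toList ++ []) = p := by simp
          rw [hp, show pvGen (n+1) p
                = p :: ("AEIOU".toList).flatMap (fun c => pvGen n (p.push c)) from rfl,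
              PySem.List.index?_cons_self]
          rfl
      | cons c cs =>
          have hc : c ∈ pvVowels := hv c List.mem_cons_self
          have hcs : ∀ x ∈ cs, x ∈ pvVowels := fun x hx => hv x (List.mem_cons_of_mem _ hx)
          have hlen' : cs.length ≤ n := by simp at hlen; omega
          have hne : p ≠ String.ofList (p.toList ++ c :: cs) := by
            intro he
            have h2 := congrArg (fun q => q.toList.length) he
            simp at h2
          have hblock : PySem.List.index? (pvGen n (p.push c))
              (String.ofList (p.toList ++ c :: cs)) = some (pvRank n cs) := by
            have h3 := ih (p.push c) cs hlen' hcs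
            simpa using h3
          have hmem : String.ofList (p.toList ++ c :: cs) ∈ pvGen n (p.push c) := by
            apply (PySem.List.index?_isSome_iff _ _).mp
            rw [hblock]; rfl
          rw [show pvGen (n+1) p
                = p :: ("AEIOU".toList).flatMap (fun c => pvGen n (p.push c)) from rfl,
              PySem.List.index?_cons_of_ne
                (xs := ("AEIOU".toList).flatMap (fun c => pvGen n (p.push c))) hne,
              pvAEIOU_toList]
          simp only [List.flatMap_cons, List.flatMap_nil, List.append_nil]
          simp only [pvVowels, List.mem_cons, List.not_mem_nil, or_false] at hc
          rcases hc with rfl | rfl | rfl | rfl | rfl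
          · rw [PySem.List.index?_append_of_mem _ hmem, hblock]
            have hidx : (List.idxOf? 'A' ['A', 'E', 'I', 'O', 'U']).getD 0 = 0 := rfl
            simp [pvRank, pvVowels, hidx]
            omega
          · rw [pv_skip_block n p 'E' 'A' cs (by decide),
                PySem.List.index?_append_of_mem _ hmem, hblock]
            have hidx : (List.idxOf? 'E' ['A', 'E', 'I', 'O', 'U']).getD 0 = 1 := rfl
            simp [pvRank, pvVowels, hidx]
            omega
          · rw [pv_skip_block n p 'I' 'A' cs (by decide),
                pv_skip_block n p 'I' 'E' cs (by decide),
                PySem.List.index?_append_of_mem _ hmem, hblock]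
            have hidx : (List.idxOf? 'I' ['A', 'E', 'I', 'O', 'U']).getD 0 = 2 := rfl
            simp [pvRank, pvVowels, hidx]
            omega
          · rw [pv_skip_block n p 'O' 'A' cs (by decide),
                pv_skip_block n p 'O' 'E' cs (by decide),
                pv_skip_block n p 'O' 'I' cs (by decide),
                PySem.List.index?_append_of_mem _ hmem, hblock]
            have hidx : (List.idxOf? 'O' ['A', 'E', 'I', 'O', 'U']).getD 0 = 3 := rfl
            simp [pvRank, pvVowels, hidx]
            omega
          · rw [pv_skip_block n p 'U' 'A' cs (by decide),
                pv_skip_block n p 'U' 'E' cs (by decide),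
                pv_skip_block n p 'U' 'I' cs (by decide),
                pv_skip_block n p 'U' 'O' cs (by decide),
                hblock]
            have hidx : (List.idxOf? 'U' ['A', 'E', 'I', 'O', 'U']).getD 0 = 4 := rfl
            simp [pvRank, pvVowels, hidx]
            omega

theorem pvSolution_eq_rank (word : String) (h : word.toList.length ≤ 5) :
    solution word = (pvRank 5 word.toList : Int) := by
  unfold solution
  rcases hs : word.toList with _ | ⟨a, _ | ⟨b, _ | ⟨c, _ | ⟨d, _ | ⟨e, _ | ⟨f, t⟩⟩⟩⟩⟩⟩ <;>
    first
      | (simp [PySem.List.enumerate_cons, PySem.List.enumerate_nil, pvRank, pvSizeT,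
           PySem.List.pyGet?, PySem.List.pyIdx?]
         done)
      | (simp [PySem.List.enumerate_cons, PySem.List.enumerate_nil, pvRank, pvSizeT,
           PySem.List.pyGet?, PySem.List.pyIdx?]
         omega)
      | (exfalso
         have h6 := congrArg List.length hs
         simp at h6 h
         omega)

-- ===== VERDICT (by name: the statement is the Claim_ definition above) =====
theorem solution_spec : Claim_equal_solution := by
  intro word _ hpre
  obtain ⟨h1, h2⟩ := hpre
  simp only [List.all_eq_true, List.contains_iff_mem] at h1
  unfold Spec_solution solution_alt
  have hw : word = String.ofList (("" : String).toList ++ word.toList) := by simp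
  rw [show PySem.List.index? (pvGen 5 "") word
        = PySem.List.index? (pvGen 5 "") (String.ofList (("" : String).toList ++ word.toList))
        from by rw [← hw],
      pvIndex_gen 5 "" word.toList h2 h1]
  simpa using pvSolution_eq_rank word h2
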